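-- pv_equiv track=rewrite | github.com/predicateacademy/physical-computing | lightshow/lightshow_patterns.py | clear_left
-- ===== SOURCE A (Python) =====
-- def off(led):
-- 	patterns = []
-- 	pattern = ''
-- 	for x in range(len(led)):
-- 		pattern += '0'
-- 	patterns.append(pattern)
-- 	return patterns
--
-- def on(led):
-- 	patterns = []
-- 	pattern = ''
-- 	for x in range(len(led)):
-- 		pattern += '1'
-- 	patterns.append(pattern)
-- 	return patterns
--
-- def clear_left(led):
--    patterns = []
--    for x in range(len(led)):
--       l = on(led)
--       for item in l:
--          for idx in range(x):
--             tlist = list(item)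
--             tlist[idx] = '0'
--             item = ''.join(tlist)
--          patterns.append(item)
--    patterns.extend(off(led))
--    return patterns
-- ===== SOURCE B (Python) =====
-- def clear_left(led):
--     cur = ['1'] * len(led)
--     patterns = [''.join(cur)]
--     for i in range(len(led)):
--         cur[i] = '0'
--         patterns.append(''.join(cur))
--     return patterns
-- ===== Notes on version B (the rewrite author's own statement) =====
-- stated objective: faster
-- what changed: B maintains one running frame (a char list) and flips exactly one LED per step in a single forward pass, instead of A's rebuilding the all-ones string each iteration and re-flipping the whole left prefix in a nested loop.
import Mathlib
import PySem

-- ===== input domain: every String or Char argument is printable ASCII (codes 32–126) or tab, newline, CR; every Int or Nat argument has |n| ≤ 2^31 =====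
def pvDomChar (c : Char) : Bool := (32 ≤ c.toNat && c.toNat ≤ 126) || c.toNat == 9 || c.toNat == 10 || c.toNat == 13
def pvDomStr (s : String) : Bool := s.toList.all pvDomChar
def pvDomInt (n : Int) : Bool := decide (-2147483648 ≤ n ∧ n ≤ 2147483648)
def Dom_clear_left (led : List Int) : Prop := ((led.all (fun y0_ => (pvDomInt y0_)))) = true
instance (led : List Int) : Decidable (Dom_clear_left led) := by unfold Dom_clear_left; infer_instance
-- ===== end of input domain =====

-- B keeps ONE running frame and flips a single LED per step instead of A's per-step
-- rebuild of the all-ones string with an inner re-flip loop (objective: faster, O(n^2) vs O(n^3)).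

-- ===== PORT A =====
-- strings are ported as their char lists (exact: all chars are '0'/'1'), joined by String.ofList
def pvOff (led : List Int) : List String :=
  let pattern := (PySem.List.pyRange 0 (led.length : Int) 1).foldl
    (fun p _ => p ++ ['0']) ([] : List Char)          -- pattern += '0'
  [String.ofList pattern]

def pvOn (led : List Int) : List String :=
  let pattern := (PySem.List.pyRange 0 (led.length : Int) 1).foldl
    (fun p _ => p ++ ['1']) ([] : List Char)          -- pattern += '1'
  [String.ofList pattern]

def clear_left (led : List Int) : List String :=
  let patterns :=
    (PySem.List.pyRange 0 (led.length : Int) 1).foldl (fun patterns x =>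
      let l := pvOn led
      l.foldl (fun patterns item =>
        let item := (PySem.List.pyRange 0 x 1).foldl (fun item idx =>
          let tlist := item.toList                       -- tlist = list(item)
          let tlist := PySem.List.pySetD tlist idx '0'   -- tlist[idx] = '0'  (idx always in range here)
          String.ofList tlist) item                          -- item = ''.join(tlist)
        patterns ++ [item]) patterns) ([] : List String)
  patterns ++ pvOff led

-- ===== PORT B =====
def clear_left_alt (led : List Int) : List String :=
  let cur := List.replicate led.length '1'               -- cur = ['1'] * len(led)
  let st := (PySem.List.pyRange 0 (led.length : Int) 1).foldl
    (fun (st : List String × List Char) i =>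
      let cur := PySem.List.pySetD st.2 i '0'            -- cur[i] = '0'
      (st.1 ++ [String.ofList cur], cur))                    -- patterns.append(''.join(cur))
    ([String.ofList cur], cur)
  st.1

-- ===== PRECONDITION & SPEC =====
def Spec_clear_left (led : List Int) (out : List String) : Prop := out = clear_left_alt led
instance (led : List Int) (out : List String) : Decidable (Spec_clear_left led out) := by unfold Spec_clear_left; infer_instance

-- ===== CLAIM (what is proved, stated in full; the proofs are below) =====
def Claim_equal_clear_left : Prop := ∀ (led : List Int), Dom_clear_left led → Spec_clear_left led (clear_left led)

-- ===== LEMMAS AND PROOFS =====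

-- the frame with the first k LEDs cleared, as a char list
def fchars (n k : Nat) : List Char := List.replicate k '0' ++ List.replicate (n - k) '1'

theorem set_fchars (n k : Nat) (hk : k < n) :
    (fchars n k).set k '0' = fchars n (k + 1) := by
  unfold fchars
  have h1 : n - k = (n - (k + 1)) + 1 := by omega
  rw [h1, List.replicate_succ, List.set_append_right _ _ (by simp),
      List.length_replicate, Nat.sub_self, List.set_cons_zero,
      show k + 1 = k + 1 from rfl]
  rw [← List.singleton_append, ← List.append_assoc, ← List.replicate_succ']

theorem build_const (m : Nat) (c : Char) :
    (PySem.List.pyRange 0 (m : Int) 1).foldl (fun p _ => p ++ [c]) ([] : List Char)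
      = List.replicate m c := by
  rw [PySem.List.foldl_append_singleton_eq_map]
  simp [List.map_const', PySem.List.length_pyRange_one]

theorem flipA (n : Nat) (x : Nat) (hx : x ≤ n) :
    (PySem.List.pyRange 0 (x : Int) 1).foldl
      (fun item idx => String.ofList (PySem.List.pySetD item.toList idx '0'))
      (String.ofList (fchars n 0)) = String.ofList (fchars n x) := by
  induction x with
  | zero => simp [PySem.List.pyRange_one_eq_nil]
  | succ x ih =>
    have hx' : x ≤ n := by omega
    have : ((x + 1 : Nat) : Int) = (x : Int) + 1 := by push_cast; ring
    rw [this, PySem.List.pyRange_one_succ_right (by positivity), List.foldl_append,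
        ih hx']
    simp only [List.foldl_cons, List.foldl_nil, String.toList_ofList,
      PySem.List.pySetD_natCast]
    rw [set_fchars n x (by omega)]

theorem flipB (n : Nat) : ∀ (d i : Nat) (acc : List String), i + d = n →
    (PySem.List.pyRange (i : Int) (n : Int) 1).foldl
      (fun (st : List String × List Char) i =>
        (st.1 ++ [String.ofList (PySem.List.pySetD st.2 i '0')], PySem.List.pySetD st.2 i '0'))
      (acc, fchars n i)
    = (acc ++ (List.range d).map (fun j => String.ofList (fchars n (i + 1 + j))), fchars n n) := by
  intro d
  induction d with
  | zero =>
    intro i acc h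
    have : i = n := by omega
    subst this
    simp [PySem.List.pyRange_one_eq_nil]
  | succ d ih =>
    intro i acc h
    rw [PySem.List.pyRange_one_cons (by exact_mod_cast Nat.lt_of_lt_of_le (by omega) le_rfl)]
    simp only [List.foldl_cons, PySem.List.pySetD_natCast]
    rw [set_fchars n i (by omega)]
    have : ((i : Int) + 1) = ((i + 1 : Nat) : Int) := by push_cast; ring
    rw [this, ih (i + 1) _ (by omega)]
    rw [List.append_assoc]
    congr 1
    rw [List.range_succ_eq_map]
    simp only [List.map_cons, List.map_map, List.singleton_append]
    congr 1
    simp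
    intro a _
    have hh : i + 1 + 1 + a = i + 1 + (a + 1) := by omega
    rw [hh]

theorem pvOn_eq (led : List Int) : pvOn led = [String.ofList (fchars led.length 0)] := by
  unfold pvOn fchars
  rw [build_const]
  simp

theorem pvOff_eq (led : List Int) : pvOff led = [String.ofList (fchars led.length led.length)] := by
  unfold pvOff fchars
  rw [build_const]
  simp

theorem clear_left_eq (led : List Int) :
    clear_left led = (List.range led.length).map (fun k => String.ofList (fchars led.length k))
      ++ [String.ofList (fchars led.length led.length)] := by
  unfold clear_left
  rw [pvOff_eq]
  simp only [pvOn_eq, List.foldl_cons, List.foldl_nil]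
  rw [PySem.List.foldl_append_singleton_eq_map]
  rw [PySem.List.pyRange_one (a := 0) (b := (led.length : Int))]
  simp only [List.map_map, List.nil_append]
  have h1 : ((led.length : Int) - 0).toNat = led.length := by omega
  rw [h1, List.append_left_inj]
  apply List.map_congr_left
  intro k hk
  simp only [Function.comp_apply, zero_add]
  exact flipA led.length k (le_of_lt (List.mem_range.mp hk))

theorem clear_left_alt_eq (led : List Int) :
    clear_left_alt led = String.ofList (fchars led.length 0)
      :: (List.range led.length).map (fun j => String.ofList (fchars led.length (j + 1))) := by
  unfold clear_left_alt
  have h0 : List.replicate led.length '1' = fchars led.length 0 := by simp [fchars]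
  rw [h0]
  dsimp only
  rw [show ((0 : Int)) = ((0 : Nat) : Int) from rfl,
      flipB led.length led.length 0 [String.ofList (fchars led.length 0)] (by omega)]
  simp
  intro a _
  rw [Nat.add_comm]

-- ===== VERDICT (by name: the statement is the Claim_ definition above) =====
theorem clear_left_spec : Claim_equal_clear_left := by
  intro led _
  unfold Spec_clear_left
  rw [clear_left_eq, clear_left_alt_eq]
  rw [show String.ofList (fchars led.length 0)
        :: (List.range led.length).map (fun j => String.ofList (fchars led.length (j + 1)))
      = (List.range (led.length + 1)).map (fun k => String.ofList (fchars led.length k)) by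
    rw [List.range_succ_eq_map]; simp [List.map_map]]
  rw [List.range_succ, List.map_append]
  simp
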